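-- pv_equiv track=rewrite | github.com/mbellabah/UROP-osBrain | test/test_bot.py | is_synchronized
-- ===== SOURCE A (Python) =====
-- from typing import Tuple
--
-- def is_synchronized(neighbor_round: dict, my_round_y, my_round_nu_bar) -> Tuple[bool, bool]:
--     y_bool: bool = True
--     nu_bar_bool: bool = True
--     for round_y, _ in neighbor_round.values():
--         if my_round_y != round_y:  # or self.round_nu_bar != round_nu_bar:
--             y_bool = False
--             break
--     for _, round_nu_bar in neighbor_round.values():
--         if my_round_nu_bar != round_nu_bar:
--             nu_bar_bool = False
--             break
--     return y_bool, nu_bar_bool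
-- ===== SOURCE B (Python) =====
-- def is_synchronized(neighbor_round, my_round_y, my_round_nu_bar):
--     y_bool = True
--     nu_bar_bool = True
--     for round_y, round_nu_bar in neighbor_round.values():
--         if my_round_y != round_y:
--             y_bool = False
--         if my_round_nu_bar != round_nu_bar:
--             nu_bar_bool = False
--         if not y_bool and not nu_bar_bool:
--             break
--     return y_bool, nu_bar_bool
-- ===== Notes on version B (the rewrite author's own statement) =====
-- stated objective: simpler
-- what changed: A scans the dict values twice (one loop per flag, each with its own break); B makes a single pass that maintains both flags simultaneously, breaking only once both are already False.
import Mathlib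
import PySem

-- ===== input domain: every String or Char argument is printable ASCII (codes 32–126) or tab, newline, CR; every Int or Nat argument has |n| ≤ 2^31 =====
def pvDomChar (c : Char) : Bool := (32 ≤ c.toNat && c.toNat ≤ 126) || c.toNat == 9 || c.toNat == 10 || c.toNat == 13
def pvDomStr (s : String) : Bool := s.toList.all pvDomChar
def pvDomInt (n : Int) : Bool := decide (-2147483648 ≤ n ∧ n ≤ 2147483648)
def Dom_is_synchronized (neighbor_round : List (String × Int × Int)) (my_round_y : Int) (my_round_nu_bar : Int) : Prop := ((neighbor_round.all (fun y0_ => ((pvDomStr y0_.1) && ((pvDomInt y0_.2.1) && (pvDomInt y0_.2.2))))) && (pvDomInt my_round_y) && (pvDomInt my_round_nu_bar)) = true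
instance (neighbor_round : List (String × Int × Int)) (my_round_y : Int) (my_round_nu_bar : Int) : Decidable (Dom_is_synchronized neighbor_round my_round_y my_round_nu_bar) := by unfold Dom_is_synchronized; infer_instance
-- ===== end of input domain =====

-- B replaces A's two sequential scans of the dict values by one pass maintaining
-- both flags at once (objective: simpler); return values are provably equal.

-- ===== PORT A =====
-- first loop of A: scan round_y components, break (return false) on first mismatch
def isyncA_loopY (my_round_y : Int) : List (String × Int × Int) → Bool
  | [] => true
  | (_, round_y, _) :: rest =>
    if my_round_y ≠ round_y then false else isyncA_loopY my_round_y rest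

-- second loop of A: scan round_nu_bar components, break on first mismatch
def isyncA_loopNu (my_round_nu_bar : Int) : List (String × Int × Int) → Bool
  | [] => true
  | (_, _, round_nu_bar) :: rest =>
    if my_round_nu_bar ≠ round_nu_bar then false else isyncA_loopNu my_round_nu_bar rest

def is_synchronized (neighbor_round : List (String × Int × Int)) (my_round_y : Int) (my_round_nu_bar : Int) : Bool × Bool :=
  (isyncA_loopY my_round_y neighbor_round, isyncA_loopNu my_round_nu_bar neighbor_round)

-- ===== PORT B =====
-- B's single loop: both flags carried together, break once both are false
def isyncB_loop (my_round_y my_round_nu_bar : Int) (y_bool nu_bar_bool : Bool) : List (String × Int × Int) → Bool × Bool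
  | [] => (y_bool, nu_bar_bool)
  | (_, round_y, round_nu_bar) :: rest =>
    let y_bool' := if my_round_y ≠ round_y then false else y_bool
    let nu_bar_bool' := if my_round_nu_bar ≠ round_nu_bar then false else nu_bar_bool
    if !y_bool' && !nu_bar_bool' then (y_bool', nu_bar_bool')
    else isyncB_loop my_round_y my_round_nu_bar y_bool' nu_bar_bool' rest

def is_synchronized_alt (neighbor_round : List (String × Int × Int)) (my_round_y : Int) (my_round_nu_bar : Int) : Bool × Bool :=
  isyncB_loop my_round_y my_round_nu_bar true true neighbor_round

-- ===== PRECONDITION & SPEC =====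
def Spec_is_synchronized (neighbor_round : List (String × Int × Int)) (my_round_y : Int) (my_round_nu_bar : Int) (out : Bool × Bool) : Prop := out = is_synchronized_alt neighbor_round my_round_y my_round_nu_bar
instance (neighbor_round : List (String × Int × Int)) (my_round_y : Int) (my_round_nu_bar : Int) (out : Bool × Bool) : Decidable (Spec_is_synchronized neighbor_round my_round_y my_round_nu_bar out) := by unfold Spec_is_synchronized; infer_instance

-- ===== CLAIM (what is proved, stated in full; the proofs are below) =====
def Claim_equal_is_synchronized : Prop := ∀ (neighbor_round : List (String × Int × Int)) (my_round_y : Int) (my_round_nu_bar : Int), Dom_is_synchronized neighbor_round my_round_y my_round_nu_bar → Spec_is_synchronized neighbor_round my_round_y my_round_nu_bar (is_synchronized neighbor_round my_round_y my_round_nu_bar)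

-- ===== LEMMAS AND PROOFS =====
-- B's loop with flags (yb, nb) computes (yb && A's first loop, nb && A's second loop).
theorem isyncB_loop_eq (my_y my_nu : Int) (l : List (String × Int × Int)) :
    ∀ yb nb, isyncB_loop my_y my_nu yb nb l =
      (yb && isyncA_loopY my_y l, nb && isyncA_loopNu my_nu l) := by
  induction l with
  | nil => intro yb nb; simp [isyncB_loop, isyncA_loopY, isyncA_loopNu]
  | cons hd tl ih =>
    intro yb nb
    obtain ⟨k, ry, rn⟩ := hd
    simp only [isyncB_loop, isyncA_loopY, isyncA_loopNu]
    split_ifs <;> cases yb <;> cases nb <;> simp_all [ih]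

-- ===== VERDICT (by name: the statement is the Claim_ definition above) =====
theorem is_synchronized_spec : Claim_equal_is_synchronized := by
  intro l my_y my_nu _
  unfold Spec_is_synchronized is_synchronized is_synchronized_alt
  simp [isyncB_loop_eq]
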